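-- pv_equiv track=rewrite | github.com/mrc6/indicadores-tecnicos-mercado-financeiro | project/rsi.py | table_with_first_rsi
-- ===== SOURCE A (Python) =====
-- def table_with_first_rsi(data, period, rsi_g, rsi_l):
--     result = []
--     n = 1  # ignora a primeira linha pois não tem ganhos / perdas
--     for collumn in data:
--         if n <= period:
--             result.append(collumn + [""] + [""])
--         if n == period + 1:
--             result.append(collumn + [rsi_g] + [rsi_l])
--         if n > period + 1:
--             result.append(collumn + [""] + [""])
--         n += 1
--     return result
-- ===== SOURCE B (Python) =====
-- def table_with_first_rsi(data, period, rsi_g, rsi_l):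
--     def pad(rows):
--         return [row + ["", ""] for row in rows]
--     if 0 <= period < len(data):
--         return pad(data[:period]) + [data[period] + [rsi_g, rsi_l]] + pad(data[period + 1:])
--     return pad(data)
-- ===== Notes on version B (the rewrite author's own statement) =====
-- stated objective: alternative
-- what changed: Replaces A's single counter-driven loop with a three-way branch per row by a split-and-concatenate decomposition: the output is built as the concatenation of three independently constructed segments (padded prefix slice, the one RSI row, padded suffix slice), falling back to padding the whole list when the marked index does not exist.
import Mathlib
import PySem

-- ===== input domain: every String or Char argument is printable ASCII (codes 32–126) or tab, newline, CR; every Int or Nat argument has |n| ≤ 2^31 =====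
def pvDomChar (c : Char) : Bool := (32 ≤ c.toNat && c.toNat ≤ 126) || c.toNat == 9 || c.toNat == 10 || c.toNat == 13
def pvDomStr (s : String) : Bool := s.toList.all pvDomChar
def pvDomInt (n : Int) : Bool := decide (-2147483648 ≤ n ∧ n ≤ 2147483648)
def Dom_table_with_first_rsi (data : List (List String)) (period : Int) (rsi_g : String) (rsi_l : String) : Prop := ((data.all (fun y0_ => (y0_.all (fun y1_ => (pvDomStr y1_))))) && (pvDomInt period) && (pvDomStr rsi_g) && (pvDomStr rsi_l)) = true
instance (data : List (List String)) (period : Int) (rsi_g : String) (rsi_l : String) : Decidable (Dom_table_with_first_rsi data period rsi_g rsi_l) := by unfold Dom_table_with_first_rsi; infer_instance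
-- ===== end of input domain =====

-- B rebuilds the table by a split-and-concatenate decomposition (padded prefix slice ++ RSI row ++ padded suffix slice) instead of A's counter loop with a three-way branch; same cost, alternative structure.


-- ===== PORT A =====
def table_with_first_rsi (data : List (List String)) (period : Int) (rsi_g : String) (rsi_l : String) : List (List String) :=
  (data.foldl
    (fun (st : List (List String) × Int) collumn =>
      let result := st.1
      let n := st.2
      let result := if n ≤ period then result ++ [collumn ++ [""] ++ [""]] else result
      let result := if n = period + 1 then result ++ [collumn ++ [rsi_g] ++ [rsi_l]] else result
      let result := if n > period + 1 then result ++ [collumn ++ [""] ++ [""]] else result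
      (result, n + 1))
    ([], 1)).1

-- ===== PORT B =====
-- B: split-and-concatenate — pad the prefix slice, emit the one RSI row, pad the suffix slice.
def pvPad (rows : List (List String)) : List (List String) :=
  rows.map (fun row => row ++ ["", ""])

def table_with_first_rsi_alt (data : List (List String)) (period : Int) (rsi_g : String) (rsi_l : String) : List (List String) :=
  if 0 ≤ period ∧ period < (data.length : Int) then
    pvPad (PySem.List.slice data none (some period))
      ++ [data.getD period.toNat [] ++ [rsi_g, rsi_l]]
      ++ pvPad (PySem.List.slice data (some (period + 1)) none)
  else
    pvPad data

-- ===== PRECONDITION & SPEC =====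
def Spec_table_with_first_rsi (data : List (List String)) (period : Int) (rsi_g : String) (rsi_l : String) (out : List (List String)) : Prop := out = table_with_first_rsi_alt data period rsi_g rsi_l
instance (data : List (List String)) (period : Int) (rsi_g : String) (rsi_l : String) (out : List (List String)) : Decidable (Spec_table_with_first_rsi data period rsi_g rsi_l out) := by unfold Spec_table_with_first_rsi; infer_instance

-- ===== CLAIM (what is proved, stated in full; the proofs are below) =====
def Claim_equal_table_with_first_rsi : Prop := ∀ (data : List (List String)) (period : Int) (rsi_g : String) (rsi_l : String), Dom_table_with_first_rsi data period rsi_g rsi_l → Spec_table_with_first_rsi data period rsi_g rsi_l (table_with_first_rsi data period rsi_g rsi_l)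

-- ===== LEMMAS AND PROOFS =====

-- rows produced from a position with offset k: the row at offset 0 gets the RSI cells
def pvGo (rsi_g rsi_l : String) : List (List String) → Int → List (List String)
  | [], _ => []
  | c :: t, k => (if k = 0 then c ++ [rsi_g, rsi_l] else c ++ ["", ""]) :: pvGo rsi_g rsi_l t (k - 1)

theorem pvFoldA (period : Int) (rsi_g rsi_l : String) :
    ∀ (data : List (List String)) (acc : List (List String)) (n : Int),
      (data.foldl
        (fun (st : List (List String) × Int) collumn =>
          let result := st.1
          let result := if st.2 ≤ period then result ++ [collumn ++ [""] ++ [""]] else result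
          let result := if st.2 = period + 1 then result ++ [collumn ++ [rsi_g] ++ [rsi_l]] else result
          let result := if st.2 > period + 1 then result ++ [collumn ++ [""] ++ [""]] else result
          (result, st.2 + 1))
        (acc, n)).1 = acc ++ pvGo rsi_g rsi_l data (period + 1 - n) := by
  intro data
  induction data with
  | nil => intro acc n; simp [pvGo]
  | cons c t ih =>
    intro acc n
    simp only [List.foldl_cons]
    by_cases h1 : n = period + 1
    · have h2 : ¬ n ≤ period := by omega
      have h3 : ¬ n > period + 1 := by omega
      simp only [h1, if_pos, lt_irrefl]
      rw [ih]
      have : period + 1 - n = 0 := by omega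
      simp [pvGo]
    · by_cases h2 : n ≤ period
      · have h3 : ¬ n > period + 1 := by omega
        simp only [h1, h2, h3, if_pos, if_false]
        rw [ih]
        have hk : period + 1 - n ≠ 0 := by omega
        simp [pvGo, hk]
        congr 1; omega
      · have h3 : n > period + 1 := by omega
        simp only [h1, h2, h3, if_pos, if_false]
        rw [ih]
        have hk : period + 1 - n ≠ 0 := by omega
        simp [pvGo, hk]
        congr 1; omega

theorem pvGo_eq (rsi_g rsi_l : String) :
    ∀ (data : List (List String)) (k : Int),
      pvGo rsi_g rsi_l data k =
        (if 0 ≤ k ∧ k < (data.length : Int) then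
          pvPad (data.take k.toNat)
            ++ [data.getD k.toNat [] ++ [rsi_g, rsi_l]]
            ++ pvPad (data.drop (k.toNat + 1))
         else pvPad data) := by
  intro data
  induction data with
  | nil => intro k; simp [pvGo, pvPad]
  | cons c t ih =>
    intro k
    by_cases hk : k = 0
    · subst hk
      simp [pvGo, ih, pvPad, List.getD]
    · simp only [pvGo, if_neg hk, ih (k - 1)]
      by_cases hin : 0 ≤ k ∧ k < ((c :: t).length : Int)
      · have hin' : 0 ≤ k - 1 ∧ k - 1 < (t.length : Int) := by
          simp only [List.length_cons] at hin; push_cast at hin ⊢; omega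
        rw [if_pos hin', if_pos hin]
        have h1 : k.toNat = (k - 1).toNat + 1 := by omega
        rw [h1]
        simp [pvPad, List.getD]
      · have hin' : ¬ (0 ≤ k - 1 ∧ k - 1 < (t.length : Int)) := by
          simp only [List.length_cons] at hin; push_cast at hin ⊢; omega
        rw [if_neg hin', if_neg hin]
        simp [pvPad]

-- ===== VERDICT (by name: the statement is the Claim_ definition above) =====
theorem table_with_first_rsi_spec : Claim_equal_table_with_first_rsi := by
  intro data period rsi_g rsi_l _
  unfold Spec_table_with_first_rsi table_with_first_rsi table_with_first_rsi_alt
  rw [pvFoldA period rsi_g rsi_l data [] 1]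
  have h1 : period + 1 - 1 = period := by omega
  rw [h1, pvGo_eq]
  by_cases hin : 0 ≤ period ∧ period < (data.length : Int)
  · rw [if_pos hin, if_pos hin]
    have hp : period = ((period.toNat : Nat) : Int) := by omega
    have hp1 : period + 1 = (((period.toNat + 1 : Nat)) : Int) := by omega
    rw [hp1, PySem.List.slice_from_natCast, hp, PySem.List.slice_to_natCast]
    simp
    have hm : (max period 0).toNat = period.toNat := by omega
    rw [hm]
  · rw [if_neg hin, if_neg hin]
    simp
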